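-- pv_equiv track=rewrite | github.com/staze0/QRadar | Script Custom/replayEVTX/replayEVTX.py | get_log_category
-- ===== SOURCE A (Python) =====
-- def get_log_category(event_id):
--     """Determine log category based on EventID"""
--     event_categories = {
--         range(4720, 4736): "User Account Management",
--         (4740,): "Account Lockout",
--         (4781,): "Account Name Change",
--         (4624,): "Successful Logon",
--         (4625,): "Failed Logon",
--         (4648,): "Logon Attempt with Explicit Credentials",
--         (4634,): "Logoff",
--         (4672,): "Special Privilege Logon",
--         (4673, 4674): "Privilege Escalation",
--         (4732, 4733, 4756, 4757): "Group Membership Changes",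
--         (4719, 4739, 4902): "Policy Changes",
--         (4656, 4663, 4660, 4661): "Object Access & File System",
--         (4688, 4689): "Process Creation & Execution",
--         (5156, 5157, 5158): "Network & Firewall",
--         (4657,): "Registry Changes",
--         (4697, 4698, 4699): "Windows Services & Scheduled Tasks",
--         (1102, 1100): "System Integrity & Security Events",
--         (4768, 4769, 4770, 4771, 4776): "Kerberos Authentication & Tickets",
--         (4778, 4779): "Remote Access Events",
--         (4726,): "User Account Deleted",
--         (4728, 4735, 4741, 4765, 4766, 4772): "Malicious Activity Indicators",
--     }
--
--     for key, category in event_categories.items():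
--         if event_id in key:
--             return category
--     return "Other"  # Default category
-- ===== SOURCE B (Python) =====
-- # Resolve the grouped definition statically: the range 4720-4735 always wins
-- # (it comes first), every other listed id is unique, so one flat dict suffices.
-- _FLAT = {
--     4740: "Account Lockout",
--     4781: "Account Name Change",
--     4624: "Successful Logon",
--     4625: "Failed Logon",
--     4648: "Logon Attempt with Explicit Credentials",
--     4634: "Logoff",
--     4672: "Special Privilege Logon",
--     4673: "Privilege Escalation",
--     4674: "Privilege Escalation",
--     4756: "Group Membership Changes",
--     4757: "Group Membership Changes",
--     4719: "Policy Changes",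
--     4739: "Policy Changes",
--     4902: "Policy Changes",
--     4656: "Object Access & File System",
--     4663: "Object Access & File System",
--     4660: "Object Access & File System",
--     4661: "Object Access & File System",
--     4688: "Process Creation & Execution",
--     4689: "Process Creation & Execution",
--     5156: "Network & Firewall",
--     5157: "Network & Firewall",
--     5158: "Network & Firewall",
--     4657: "Registry Changes",
--     4697: "Windows Services & Scheduled Tasks",
--     4698: "Windows Services & Scheduled Tasks",
--     4699: "Windows Services & Scheduled Tasks",
--     1102: "System Integrity & Security Events",
--     1100: "System Integrity & Security Events",
--     4768: "Kerberos Authentication & Tickets",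
--     4769: "Kerberos Authentication & Tickets",
--     4770: "Kerberos Authentication & Tickets",
--     4771: "Kerberos Authentication & Tickets",
--     4776: "Kerberos Authentication & Tickets",
--     4778: "Remote Access Events",
--     4779: "Remote Access Events",
--     4741: "Malicious Activity Indicators",
--     4765: "Malicious Activity Indicators",
--     4766: "Malicious Activity Indicators",
--     4772: "Malicious Activity Indicators",
-- }
--
-- def get_log_category(event_id):
--     """Determine log category based on EventID"""
--     if 4720 <= event_id < 4736:
--         return "User Account Management"
--     return _FLAT.get(event_id, "Other")
-- ===== Notes on version B (the rewrite author's own statement) =====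
-- stated objective: simpler
-- what changed: Resolved the grouped definition statically: the first group (range 4720-4735) always wins over later overlapping ids, so B is one interval test plus a single flat id-to-category dict lookup, replacing A's per-call scan over grouped range/tuple membership tests.
import Mathlib
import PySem

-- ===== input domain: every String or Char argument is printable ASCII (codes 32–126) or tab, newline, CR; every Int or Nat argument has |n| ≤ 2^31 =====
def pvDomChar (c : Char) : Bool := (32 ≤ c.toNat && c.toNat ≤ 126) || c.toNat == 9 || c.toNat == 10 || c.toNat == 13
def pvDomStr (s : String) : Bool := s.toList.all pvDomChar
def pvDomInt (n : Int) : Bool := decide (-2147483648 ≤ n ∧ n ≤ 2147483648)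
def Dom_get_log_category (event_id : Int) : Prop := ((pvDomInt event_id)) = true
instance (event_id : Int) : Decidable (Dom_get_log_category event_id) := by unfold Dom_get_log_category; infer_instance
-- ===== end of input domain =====

-- B resolves the grouped definition statically: the 4720-4735 range (first group) always wins,
-- so B is one interval test plus a flat id→category dict lookup instead of A's per-call group scan.

-- ===== PORT A =====
-- the dict literal of A: keys are ranges/tuples, iterated in insertion order
def pvAGroups : List (List Int × String) := [
  (PySem.List.pyRange 4720 4736 1, "User Account Management"),
  ([4740], "Account Lockout"),
  ([4781], "Account Name Change"),
  ([4624], "Successful Logon"),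
  ([4625], "Failed Logon"),
  ([4648], "Logon Attempt with Explicit Credentials"),
  ([4634], "Logoff"),
  ([4672], "Special Privilege Logon"),
  ([4673, 4674], "Privilege Escalation"),
  ([4732, 4733, 4756, 4757], "Group Membership Changes"),
  ([4719, 4739, 4902], "Policy Changes"),
  ([4656, 4663, 4660, 4661], "Object Access & File System"),
  ([4688, 4689], "Process Creation & Execution"),
  ([5156, 5157, 5158], "Network & Firewall"),
  ([4657], "Registry Changes"),
  ([4697, 4698, 4699], "Windows Services & Scheduled Tasks"),
  ([1102, 1100], "System Integrity & Security Events"),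
  ([4768, 4769, 4770, 4771, 4776], "Kerberos Authentication & Tickets"),
  ([4778, 4779], "Remote Access Events"),
  ([4726], "User Account Deleted"),
  ([4728, 4735, 4741, 4765, 4766, 4772], "Malicious Activity Indicators")]

-- 'for key, category in event_categories.items(): if event_id in key: return category'
def pvALoop (e : Int) : List (List Int × String) → String
  | [] => "Other"
  | (key, cat) :: rest => if e ∈ key then cat else pvALoop e rest

def get_log_category (event_id : Int) : String := pvALoop event_id pvAGroups

-- ===== PORT B =====
-- Source B's _FLAT dict literal (all keys distinct, none inside 4720..4735)
def pvFlat : PySem.Dict Int String := PySem.Dict.ofList [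
  (4740, "Account Lockout"),
  (4781, "Account Name Change"),
  (4624, "Successful Logon"),
  (4625, "Failed Logon"),
  (4648, "Logon Attempt with Explicit Credentials"),
  (4634, "Logoff"),
  (4672, "Special Privilege Logon"),
  (4673, "Privilege Escalation"),
  (4674, "Privilege Escalation"),
  (4756, "Group Membership Changes"),
  (4757, "Group Membership Changes"),
  (4719, "Policy Changes"),
  (4739, "Policy Changes"),
  (4902, "Policy Changes"),
  (4656, "Object Access & File System"),
  (4663, "Object Access & File System"),
  (4660, "Object Access & File System"),
  (4661, "Object Access & File System"),
  (4688, "Process Creation & Execution"),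
  (4689, "Process Creation & Execution"),
  (5156, "Network & Firewall"),
  (5157, "Network & Firewall"),
  (5158, "Network & Firewall"),
  (4657, "Registry Changes"),
  (4697, "Windows Services & Scheduled Tasks"),
  (4698, "Windows Services & Scheduled Tasks"),
  (4699, "Windows Services & Scheduled Tasks"),
  (1102, "System Integrity & Security Events"),
  (1100, "System Integrity & Security Events"),
  (4768, "Kerberos Authentication & Tickets"),
  (4769, "Kerberos Authentication & Tickets"),
  (4770, "Kerberos Authentication & Tickets"),
  (4771, "Kerberos Authentication & Tickets"),
  (4776, "Kerberos Authentication & Tickets"),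
  (4778, "Remote Access Events"),
  (4779, "Remote Access Events"),
  (4741, "Malicious Activity Indicators"),
  (4765, "Malicious Activity Indicators"),
  (4766, "Malicious Activity Indicators"),
  (4772, "Malicious Activity Indicators")]

def get_log_category_alt (event_id : Int) : String :=
  if 4720 ≤ event_id ∧ event_id < 4736 then "User Account Management"
  else PySem.Dict.getD pvFlat event_id "Other"

-- ===== PRECONDITION & SPEC =====
def Spec_get_log_category (event_id : Int) (out : String) : Prop := out = get_log_category_alt event_id
instance (event_id : Int) (out : String) : Decidable (Spec_get_log_category event_id out) := by unfold Spec_get_log_category; infer_instance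

-- ===== CLAIM (what is proved, stated in full; the proofs are below) =====
def Claim_equal_get_log_category : Prop := ∀ (event_id : Int), Dom_get_log_category event_id → Spec_get_log_category event_id (get_log_category event_id)

-- ===== LEMMAS AND PROOFS =====

-- every event id mentioned by either program
def pvIds : List Int := [4720,4721,4722,4723,4724,4725,4726,4727,4728,4729,4730,4731,
  4732,4733,4734,4735,4740,4781,4624,4625,4648,4634,4672,4673,4674,4756,4757,4719,4739,
  4902,4656,4663,4660,4661,4688,4689,5156,5157,5158,4657,4697,4698,4699,1102,1100,4768,
  4769,4770,4771,4776,4778,4779,4741,4765,4766,4772]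

-- A and B agree on every mentioned id (finite check)
set_option maxRecDepth 40000 in
theorem pv_agree_on_ids :
    (pvIds.all (fun e => get_log_category e == get_log_category_alt e)) = true := by decide

-- A's loop returns the default when no group contains e
theorem pvALoop_other (e : Int) :
    ∀ gs : List (List Int × String), (∀ p ∈ gs, e ∉ p.1) → pvALoop e gs = "Other"
  | [], _ => rfl
  | (key, cat) :: rest, h => by
      simp only [pvALoop]
      rw [if_neg (h _ List.mem_cons_self)]
      exact pvALoop_other e rest (fun p hp => h p (List.mem_cons_of_mem _ hp))

-- every id occurring in A's groups is in pvIds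
set_option maxRecDepth 40000 in
theorem pv_groups_cover :
    (pvAGroups.all (fun p => p.1.all (fun x => decide (x ∈ pvIds)))) = true := by decide

theorem pvA_other (e : Int) (h : e ∉ pvIds) : get_log_category e = "Other" := by
  apply pvALoop_other
  intro p hp hx
  have c := pv_groups_cover
  rw [List.all_eq_true] at c
  have c2 := c p hp
  rw [List.all_eq_true] at c2
  exact h (of_decide_eq_true (c2 e hx))

-- every key of B's flat dict is in pvIds
set_option maxRecDepth 40000 in
theorem pv_keys_cover : (pvFlat.keys.all (fun k => decide (k ∈ pvIds))) = true := by decide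

theorem pvB_other (e : Int) (h : e ∉ pvIds) : get_log_category_alt e = "Other" := by
  unfold get_log_category_alt
  rw [if_neg]
  · apply PySem.Dict.getD_of_not_contains
    cases hc : pvFlat.contains e with
    | false => rfl
    | true =>
      have hmem := (PySem.Dict.contains_iff_mem_keys _ _).mp hc
      have c := pv_keys_cover
      rw [List.all_eq_true] at c
      exact absurd (of_decide_eq_true (c e hmem)) h
  · rintro ⟨h1, h2⟩
    apply h
    interval_cases e <;> decide

theorem pv_main (e : Int) : get_log_category e = get_log_category_alt e := by
  by_cases h : e ∈ pvIds
  · have k := pv_agree_on_ids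
    rw [List.all_eq_true] at k
    exact eq_of_beq (k e h)
  · rw [pvA_other e h, pvB_other e h]

-- ===== VERDICT (by name: the statement is the Claim_ definition above) =====
theorem get_log_category_spec : Claim_equal_get_log_category := by
  intro e _
  exact pv_main e
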